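-- pv_equiv track=rewrite | github.com/hongningsg/Chinese-Chess-Go | chinese_chess_alpha_zero/environment/Game/Model/Piece/Cannon.py | _slotsInDirection
-- ===== SOURCE A (Python) =====
-- def _slotsInDirection(ix, iy, x, y, dist_x, dist_y):
--     if ix == 0 and iy > 0:
--         return [(0, i) for i in range(1, dist_y-y+1)]
--     elif ix == 0 and iy < 0:
--         return [(0, i) for i in range(-1, dist_y-y-1, -1)]
--     elif ix > 0 and iy == 0:
--         return [(i, 0) for i in range(1, dist_x-x+1)]
--     elif ix < 0 and iy == 0:
--         return [(i, 0) for i in range(-1, dist_x-x-1, -1)]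
--     else:
--         raise ValueError(f"Direction not support: {ix}, {iy}")
-- ===== SOURCE B (Python) =====
-- def _slotsInDirection(ix, iy, x, y, dist_x, dist_y):
--     if ix == 0 and iy != 0:
--         sx, sy = 0, (1 if iy > 0 else -1)
--     elif iy == 0 and ix != 0:
--         sx, sy = (1 if ix > 0 else -1), 0
--     else:
--         raise ValueError(f"Direction not support: {ix}, {iy}")
--     out = []
--     dx, dy = sx, sy
--     while sx * (x + dx) <= sx * dist_x and sy * (y + dy) <= sy * dist_y:
--         out.append((dx, dy))
--         dx += sx
--         dy += sy
--     return out
-- ===== Notes on version B (the rewrite author's own statement) =====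
-- stated objective: alternative
-- what changed: Replaces A's four hard-coded range comprehensions by an explicit step-by-step walk: normalize the direction to a unit vector, then a while loop appends each offset until the walked square passes the target coordinate.
import Mathlib
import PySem

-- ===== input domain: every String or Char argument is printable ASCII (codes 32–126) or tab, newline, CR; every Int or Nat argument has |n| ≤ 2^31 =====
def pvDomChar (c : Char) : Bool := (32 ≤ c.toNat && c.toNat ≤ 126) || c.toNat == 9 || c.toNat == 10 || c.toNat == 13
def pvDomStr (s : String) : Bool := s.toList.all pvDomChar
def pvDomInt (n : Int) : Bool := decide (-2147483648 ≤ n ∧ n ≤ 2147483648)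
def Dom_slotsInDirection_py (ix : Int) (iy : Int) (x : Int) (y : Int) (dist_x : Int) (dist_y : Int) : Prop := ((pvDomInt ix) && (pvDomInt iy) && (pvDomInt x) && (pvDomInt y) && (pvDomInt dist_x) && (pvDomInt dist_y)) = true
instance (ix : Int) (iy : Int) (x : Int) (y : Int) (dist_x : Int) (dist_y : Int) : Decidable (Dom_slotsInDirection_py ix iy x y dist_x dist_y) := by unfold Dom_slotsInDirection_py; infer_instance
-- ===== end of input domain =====

-- B replaces A's four range comprehensions by an explicit step-by-step walk along the
-- unit direction vector, appending each offset until the walk passes the target; same cost.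

-- ===== PORT A =====
def slotsInDirection_py (ix : Int) (iy : Int) (x : Int) (y : Int) (dist_x : Int) (dist_y : Int) : List (Int × Int) :=
  if ix = 0 ∧ iy > 0 then
    (PySem.List.pyRange 1 (dist_y - y + 1) 1).map (fun i => ((0 : Int), i))
  else if ix = 0 ∧ iy < 0 then
    (PySem.List.pyRange (-1) (dist_y - y - 1) (-1)).map (fun i => ((0 : Int), i))
  else if ix > 0 ∧ iy = 0 then
    (PySem.List.pyRange 1 (dist_x - x + 1) 1).map (fun i => (i, (0 : Int)))
  else if ix < 0 ∧ iy = 0 then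
    (PySem.List.pyRange (-1) (dist_x - x - 1) (-1)).map (fun i => (i, (0 : Int)))
  else
    []  -- raise ValueError: excluded by Pre_

-- ===== PORT B =====
-- the while loop of Source B, recursing on a fuel that bounds its iteration count for a
-- unit direction vector (a pure totality device: the loop stops on its own condition,
-- and for the unit vectors B passes the fuel never runs out before the condition fails)
def pvWalkGo (sx : Int) (sy : Int) (x : Int) (y : Int) (dist_x : Int) (dist_y : Int) : Nat → Int → Int → List (Int × Int)
  | 0, _, _ => []
  | Nat.succ n, dx, dy =>
    if sx * (x + dx) ≤ sx * dist_x ∧ sy * (y + dy) ≤ sy * dist_y then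
      (dx, dy) :: pvWalkGo sx sy x y dist_x dist_y n (dx + sx) (dy + sy)
    else []

def pvWalk (sx : Int) (sy : Int) (x : Int) (y : Int) (dist_x : Int) (dist_y : Int) (dx : Int) (dy : Int) : List (Int × Int) :=
  pvWalkGo sx sy x y dist_x dist_y (sx * (dist_x - x - dx) + sy * (dist_y - y - dy) + 1).toNat dx dy

def slotsInDirection_py_alt (ix : Int) (iy : Int) (x : Int) (y : Int) (dist_x : Int) (dist_y : Int) : List (Int × Int) :=
  if ix = 0 ∧ iy ≠ 0 then
    let sy : Int := if iy > 0 then 1 else -1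
    pvWalk 0 sy x y dist_x dist_y 0 sy
  else if iy = 0 ∧ ix ≠ 0 then
    let sx : Int := if ix > 0 then 1 else -1
    pvWalk sx 0 x y dist_x dist_y sx 0
  else []  -- raise ValueError: excluded by Pre_

-- ===== PRECONDITION & SPEC =====
-- Pre_ excludes exactly the inputs where A raises ValueError (ix, iy both zero or both nonzero); B raises the same error there.
def Pre_slotsInDirection_py (ix : Int) (iy : Int) (x : Int) (y : Int) (dist_x : Int) (dist_y : Int) : Prop :=
  (ix = 0 ∧ iy ≠ 0) ∨ (ix ≠ 0 ∧ iy = 0)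
instance (ix : Int) (iy : Int) (x : Int) (y : Int) (dist_x : Int) (dist_y : Int) : Decidable (Pre_slotsInDirection_py ix iy x y dist_x dist_y) := by unfold Pre_slotsInDirection_py; infer_instance

def pvWitness_slotsInDirection_py : Int × Int × Int × Int × Int × Int := (0, 1, 4, 2, 4, 7)

def Spec_slotsInDirection_py (ix : Int) (iy : Int) (x : Int) (y : Int) (dist_x : Int) (dist_y : Int) (out : List (Int × Int)) : Prop := out = slotsInDirection_py_alt ix iy x y dist_x dist_y
instance (ix : Int) (iy : Int) (x : Int) (y : Int) (dist_x : Int) (dist_y : Int) (out : List (Int × Int)) : Decidable (Spec_slotsInDirection_py ix iy x y dist_x dist_y out) := by unfold Spec_slotsInDirection_py; infer_instance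

-- ===== CLAIM =====
def Claim_equal_slotsInDirection_py : Prop := ∀ (ix : Int) (iy : Int) (x : Int) (y : Int) (dist_x : Int) (dist_y : Int), Dom_slotsInDirection_py ix iy x y dist_x dist_y → Pre_slotsInDirection_py ix iy x y dist_x dist_y → Spec_slotsInDirection_py ix iy x y dist_x dist_y (slotsInDirection_py ix iy x y dist_x dist_y)

-- ===== LEMMAS AND PROOFS =====

-- the upward-y walk from offset d is the ascending range d .. dist_y - y
theorem walkGo_up_y (x y X Y : Int) : ∀ (n : Nat) (d : Int), (Y - y + 1 - d).toNat ≤ n →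
    pvWalkGo 0 1 x y X Y n 0 d = (PySem.List.pyRange d (Y - y + 1) 1).map (fun i => ((0 : Int), i)) := by
  intro n
  induction n with
  | zero =>
    intro d hd
    rw [pvWalkGo, PySem.List.pyRange_one_eq_nil (by omega)]
    simp
  | succ n ih =>
    intro d hd
    rw [pvWalkGo]
    by_cases hc : y + d ≤ Y
    · rw [if_pos (by constructor <;> omega), PySem.List.pyRange_one_cons (by omega), List.map_cons]
      simp only [zero_add]
      rw [ih (d + 1) (by omega)]
    · rw [if_neg (by omega), PySem.List.pyRange_one_eq_nil (by omega)]
      simp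

theorem walk_up_y (x y X Y d : Int) :
    pvWalk 0 1 x y X Y 0 d = (PySem.List.pyRange d (Y - y + 1) 1).map (fun i => ((0 : Int), i)) := by
  unfold pvWalk
  exact walkGo_up_y x y X Y _ d (by omega)

-- the downward-y walk from offset d is the descending range d .. dist_y - y
theorem walkGo_down_y (x y X Y : Int) : ∀ (n : Nat) (d : Int), (d - (Y - y - 1)).toNat ≤ n →
    pvWalkGo 0 (-1) x y X Y n 0 d = (PySem.List.pyRange d (Y - y - 1) (-1)).map (fun i => ((0 : Int), i)) := by
  intro n
  induction n with
  | zero =>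
    intro d hd
    rw [pvWalkGo, PySem.List.pyRange_neg_one_eq_nil (by omega)]
    simp
  | succ n ih =>
    intro d hd
    rw [pvWalkGo]
    by_cases hc : Y ≤ y + d
    · rw [if_pos (by constructor <;> omega), PySem.List.pyRange_neg_one_cons (by omega), List.map_cons]
      simp only [zero_add]
      have he : d + -1 = d - 1 := by ring
      rw [he, ih (d - 1) (by omega)]
    · rw [if_neg (by omega), PySem.List.pyRange_neg_one_eq_nil (by omega)]
      simp

theorem walk_down_y (x y X Y d : Int) :
    pvWalk 0 (-1) x y X Y 0 d = (PySem.List.pyRange d (Y - y - 1) (-1)).map (fun i => ((0 : Int), i)) := by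
  unfold pvWalk
  exact walkGo_down_y x y X Y _ d (by omega)

-- the upward-x walk from offset d is the ascending range d .. dist_x - x
theorem walkGo_up_x (x y X Y : Int) : ∀ (n : Nat) (d : Int), (X - x + 1 - d).toNat ≤ n →
    pvWalkGo 1 0 x y X Y n d 0 = (PySem.List.pyRange d (X - x + 1) 1).map (fun i => (i, (0 : Int))) := by
  intro n
  induction n with
  | zero =>
    intro d hd
    rw [pvWalkGo, PySem.List.pyRange_one_eq_nil (by omega)]
    simp
  | succ n ih =>
    intro d hd
    rw [pvWalkGo]
    by_cases hc : x + d ≤ X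
    · rw [if_pos (by constructor <;> omega), PySem.List.pyRange_one_cons (by omega), List.map_cons]
      simp only [zero_add]
      rw [ih (d + 1) (by omega)]
    · rw [if_neg (by omega), PySem.List.pyRange_one_eq_nil (by omega)]
      simp

theorem walk_up_x (x y X Y d : Int) :
    pvWalk 1 0 x y X Y d 0 = (PySem.List.pyRange d (X - x + 1) 1).map (fun i => (i, (0 : Int))) := by
  unfold pvWalk
  exact walkGo_up_x x y X Y _ d (by omega)

-- the downward-x walk from offset d is the descending range d .. dist_x - x
theorem walkGo_down_x (x y X Y : Int) : ∀ (n : Nat) (d : Int), (d - (X - x - 1)).toNat ≤ n →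
    pvWalkGo (-1) 0 x y X Y n d 0 = (PySem.List.pyRange d (X - x - 1) (-1)).map (fun i => (i, (0 : Int))) := by
  intro n
  induction n with
  | zero =>
    intro d hd
    rw [pvWalkGo, PySem.List.pyRange_neg_one_eq_nil (by omega)]
    simp
  | succ n ih =>
    intro d hd
    rw [pvWalkGo]
    by_cases hc : X ≤ x + d
    · rw [if_pos (by constructor <;> omega), PySem.List.pyRange_neg_one_cons (by omega), List.map_cons]
      simp only [zero_add]
      have he : d + -1 = d - 1 := by ring
      rw [he, ih (d - 1) (by omega)]
    · rw [if_neg (by omega), PySem.List.pyRange_neg_one_eq_nil (by omega)]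
      simp

theorem walk_down_x (x y X Y d : Int) :
    pvWalk (-1) 0 x y X Y d 0 = (PySem.List.pyRange d (X - x - 1) (-1)).map (fun i => (i, (0 : Int))) := by
  unfold pvWalk
  exact walkGo_down_x x y X Y _ d (by omega)

-- ===== VERDICT =====
theorem slotsInDirection_py_spec : Claim_equal_slotsInDirection_py := by
  intro ix iy x y dist_x dist_y _ hpre
  unfold Spec_slotsInDirection_py slotsInDirection_py slotsInDirection_py_alt
  rcases hpre with ⟨hx0, hy⟩ | ⟨hx, hy0⟩ <;> split_ifs <;>
    simp_all [walk_up_y, walk_down_y, walk_up_x, walk_down_x] <;> omega
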